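-- pv_equiv track=rewrite | github.com/saltanat691/rag-recipes-project | evaluate_rag.py | select_top_recipes_from_chunks
-- ===== SOURCE A (Python) =====
-- from typing import List, Dict, Tuple
--
-- def select_top_recipes_from_chunks(
--         chunks: List[Tuple[str, str, str, str]],
--         top_recipes: int = 12,
--         max_chars_per_recipe: int = 900,
-- ) -> List[Dict]:
--     """
--     Pick top recipes based on first occurrence in chunk retrieval list
--     (proxy for nearest distance rank), then build rerank candidates.
--     chunks items: (note_id, section, content, title)
--     returns: list of {"note_id": str, "text": str}
--     """
--     order: List[str] = []
--     per_recipe_parts: Dict[str, List[str]] = {}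
--
--     for note_id, section, content, title in chunks:
--         if note_id not in per_recipe_parts:
--             order.append(note_id)
--             per_recipe_parts[note_id] = []
--         per_recipe_parts[note_id].append(f"TITLE: {title}\nSECTION: {section}\n{content}")
--
--     candidates = []
--     for rid in order[:top_recipes]:
--         txt = "\n\n".join(per_recipe_parts[rid])[:max_chars_per_recipe]
--         candidates.append({"note_id": rid, "text": txt})
--     return candidates
-- ===== SOURCE B (Python) =====
-- def select_top_recipes_from_chunks(
--         chunks,
--         top_recipes=12,
--         max_chars_per_recipe=900,
-- ):
--     selected = list(dict.fromkeys(c[0] for c in chunks))[:top_recipes]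
--     candidates = []
--     for rid in selected:
--         parts = [f"TITLE: {title}\nSECTION: {section}\n{content}"
--                  for note_id, section, content, title in chunks if note_id == rid]
--         candidates.append({"note_id": rid,
--                            "text": "\n\n".join(parts)[:max_chars_per_recipe]})
--     return candidates
-- ===== Notes on version B (the rewrite author's own statement) =====
-- stated objective: alternative
-- what changed: A builds an order list and a per-recipe dict of parts in one grouping pass; B instead dedups the note_ids in first-occurrence order, slices off the top ids, and rebuilds each selected recipe's parts by filtering the chunk list per id.
import Mathlib
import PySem

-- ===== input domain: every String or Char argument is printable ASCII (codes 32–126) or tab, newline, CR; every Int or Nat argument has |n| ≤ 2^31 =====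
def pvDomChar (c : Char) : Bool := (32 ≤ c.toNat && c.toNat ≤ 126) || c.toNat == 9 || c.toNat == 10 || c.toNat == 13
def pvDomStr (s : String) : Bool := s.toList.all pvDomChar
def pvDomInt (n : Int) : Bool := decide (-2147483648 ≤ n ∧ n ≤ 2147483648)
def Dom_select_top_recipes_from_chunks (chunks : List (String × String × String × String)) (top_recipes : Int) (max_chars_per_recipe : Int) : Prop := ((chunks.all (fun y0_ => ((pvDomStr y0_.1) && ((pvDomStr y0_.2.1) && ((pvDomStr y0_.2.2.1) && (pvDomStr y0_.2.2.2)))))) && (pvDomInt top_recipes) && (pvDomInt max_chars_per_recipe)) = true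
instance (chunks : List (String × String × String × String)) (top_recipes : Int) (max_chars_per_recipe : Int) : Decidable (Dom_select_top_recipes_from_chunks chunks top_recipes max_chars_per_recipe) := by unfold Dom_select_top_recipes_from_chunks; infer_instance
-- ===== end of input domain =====

-- B replaces A's single-pass dict grouping by a dedup-then-per-recipe-filter decomposition (alternative, not faster); return value only, no mutation involved.

-- ===== PORT A =====
-- f-string helper shared verbatim by both ports: f"TITLE: {title}\nSECTION: {section}\n{content}" for a chunk (note_id, section, content, title)
def pvFmtA (c : String × String × String × String) : String :=
  "TITLE: " ++ c.2.2.2 ++ "\nSECTION: " ++ c.2.1 ++ "\n" ++ c.2.2.1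

-- one iteration of A's first loop over the state (order, per_recipe_parts)
def pvStepA (s : List String × PySem.Dict String (List String))
    (c : String × String × String × String) :
    List String × PySem.Dict String (List String) :=
  let s' := if s.2.contains c.1 then s else (s.1 ++ [c.1], s.2.insert c.1 [])
  (s'.1, s'.2.modify c.1 [] (· ++ [pvFmtA c]))

def select_top_recipes_from_chunks (chunks : List (String × String × String × String)) (top_recipes : Int) (max_chars_per_recipe : Int) : List (List (String × String)) :=
  let s := chunks.foldl pvStepA ([], PySem.Dict.empty)
  -- per_recipe_parts[rid]: every rid in order is a present key, so getD is exact here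
  (PySem.List.slice s.1 none (some top_recipes)).map (fun rid =>
    [("note_id", rid),
     ("text", PySem.Str.slice (PySem.Str.join "\n\n" (s.2.getD rid [])) none (some max_chars_per_recipe))])

-- ===== PORT B =====
def select_top_recipes_from_chunks_alt (chunks : List (String × String × String × String)) (top_recipes : Int) (max_chars_per_recipe : Int) : List (List (String × String)) :=
  let selected := PySem.List.slice (PySem.List.dedup (chunks.map (·.1))) none (some top_recipes)
  selected.map (fun rid =>
    let parts := (chunks.filter (fun c => c.1 == rid)).map pvFmtA
    [("note_id", rid),
     ("text", PySem.Str.slice (PySem.Str.join "\n\n" parts) none (some max_chars_per_recipe))])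

-- ===== PRECONDITION & SPEC =====
def Spec_select_top_recipes_from_chunks (chunks : List (String × String × String × String)) (top_recipes : Int) (max_chars_per_recipe : Int) (out : List (List (String × String))) : Prop := out = select_top_recipes_from_chunks_alt chunks top_recipes max_chars_per_recipe
instance (chunks : List (String × String × String × String)) (top_recipes : Int) (max_chars_per_recipe : Int) (out : List (List (String × String))) : Decidable (Spec_select_top_recipes_from_chunks chunks top_recipes max_chars_per_recipe out) := by unfold Spec_select_top_recipes_from_chunks; infer_instance

-- ===== CLAIM (what is proved, stated in full; the proofs are below) =====
def Claim_equal_select_top_recipes_from_chunks : Prop := ∀ (chunks : List (String × String × String × String)) (top_recipes : Int) (max_chars_per_recipe : Int), Dom_select_top_recipes_from_chunks chunks top_recipes max_chars_per_recipe → Spec_select_top_recipes_from_chunks chunks top_recipes max_chars_per_recipe (select_top_recipes_from_chunks chunks top_recipes max_chars_per_recipe)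

-- ===== LEMMAS AND PROOFS =====

-- overwriting a freshly inserted key is one insertion
theorem pvInsertInsert (d : PySem.Dict String (List String)) (k : String) (v w : List String)
    (h : d.contains k = false) :
    (d.insert k v).insert k w = d.insert k w := by
  apply PySem.Dict.ext
  rw [PySem.Dict.items_insert_of_contains _ _ (PySem.Dict.contains_insert_self d k v),
      PySem.Dict.items_insert_of_not_contains _ _ h,
      PySem.Dict.items_insert_of_not_contains _ _ h, List.map_append]
  have hk : ∀ p ∈ d.items, (p.1 == k) = false := by
    intro p hp
    by_contra hb
    have : p.1 = k := by simpa using hb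
    have : k ∈ d.keys := this ▸ PySem.Dict.mem_keys_of_mem_items d hp
    rw [PySem.Dict.contains_eq_decide_mem_keys] at h
    simp [this] at h
  congr 1
  · conv_rhs => rw [← List.map_id d.items]
    exact List.map_congr_left (fun p hp => by simp [hk p hp])
  · simp

-- A's "d[k] = []; d[k].append(x)" on a fresh key is a single modify on the original dict
theorem pvStepA_modify (d : PySem.Dict String (List String)) (k : String) (f : List String → List String)
    (h : d.contains k = false) :
    (d.insert k []).modify k [] f = d.modify k [] f := by
  simp [PySem.Dict.modify, PySem.Dict.getD_insert_self, PySem.Dict.getD_of_not_contains _ _ h,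
    pvInsertInsert _ _ _ _ h]

-- A's first loop, started from a state whose dict keys are exactly the order list,
-- is the Set.add (dedup) loop on the note_ids paired with the plain grouping loop on the dict
theorem pvStepA_fold (cs : List (String × String × String × String))
    (o : List String) (d : PySem.Dict String (List String)) (h : d.keys = o) :
    cs.foldl pvStepA (o, d) =
      ((cs.map (·.1)).foldl PySem.Set.add o,
       cs.foldl (fun d c => d.modify c.1 [] (· ++ [pvFmtA c])) d) := by
  induction cs generalizing o d with
  | nil => rfl
  | cons c cs ih =>
    simp only [List.foldl_cons, List.map_cons]
    by_cases hc : d.contains c.1 = true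
    · have ho : PySem.Set.add o c.1 = o := by
        simp [PySem.Set.add, ← h, ← PySem.Dict.contains_iff_mem_keys, hc]
      rw [ho]
      have : pvStepA (o, d) c = (o, d.modify c.1 [] (· ++ [pvFmtA c])) := by
        simp [pvStepA, hc]
      rw [this]
      exact ih _ _ (by rw [PySem.Dict.keys_modify, PySem.Dict.keys_insert_of_contains _ _ hc, h])
    · have hc' : d.contains c.1 = false := by simpa using hc
      have ho : PySem.Set.add o c.1 = o ++ [c.1] := by
        simp [PySem.Set.add, ← h, ← PySem.Dict.contains_iff_mem_keys, hc']
      rw [ho]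
      have : pvStepA (o, d) c = (o ++ [c.1], d.modify c.1 [] (· ++ [pvFmtA c])) := by
        simp only [pvStepA, hc', Bool.false_eq_true, if_false]
        rw [pvStepA_modify _ _ _ hc']
      rw [this]
      refine ih _ _ ?_
      rw [PySem.Dict.keys_modify]
      rw [PySem.Dict.keys_insert_of_not_contains _ _ hc', h]

-- the grouped parts for any rid are exactly B's filtered, formatted sublist
theorem pvGetD (chunks : List (String × String × String × String)) (rid : String) :
    (chunks.foldl (fun d c => d.modify c.1 [] (· ++ [pvFmtA c])) PySem.Dict.empty).getD rid []
      = (chunks.filter (fun c => c.1 == rid)).map pvFmtA := by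
  have h := PySem.Dict.getD_foldl_modify_append (chunks.map (fun c => (c.1, pvFmtA c))) PySem.Dict.empty rid
  rw [List.foldl_map] at h
  simp only [h, PySem.Dict.getD_empty, List.nil_append, List.filter_map, List.map_map]
  rfl

-- ===== VERDICT (by name: the statement is the Claim_ definition above) =====
theorem select_top_recipes_from_chunks_spec : Claim_equal_select_top_recipes_from_chunks := by
  intro chunks top_recipes max_chars_per_recipe _
  unfold Spec_select_top_recipes_from_chunks
  unfold select_top_recipes_from_chunks select_top_recipes_from_chunks_alt
  rw [pvStepA_fold chunks [] _ PySem.Dict.keys_empty]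
  rw [PySem.List.dedup_eq_ofList, PySem.Set.ofList_eq_foldl]
  exact List.map_congr_left (fun rid _ => by rw [pvGetD])
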